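-- pv_equiv track=rewrite | github.com/DanielHara/leetcode-solutions | 2191.py | mapNumber
-- ===== SOURCE A (Python) =====
-- from typing import List
--
-- def mapNumber(number: int, mapping: List[int]) -> int:
--     if number == 0:
--         return mapping[0]
--
--     reversed_digits = []
--     while number > 0:
--         reversed_digits.append(number % 10)
--         number = number // 10
--
--     result = 0
--     power = len(reversed_digits) - 1
--     while reversed_digits:
--         result = result + mapping[reversed_digits.pop()] * 10 ** power
--         power = power - 1
--
--     return result
-- ===== SOURCE B (Python) =====
-- def mapNumber(number: int, mapping: list) -> int:
--     if number == 0: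
--         return mapping[0]
--     result = 0
--     multiplier = 1
--     n = number
--     while n > 0:
--         result += mapping[n % 10] * multiplier
--         multiplier *= 10
--         n //= 10
--     return result
-- ===== Notes on version B (the rewrite author's own statement) =====
-- stated objective: simpler
-- what changed: Replaces A's two sequential loops (extract digits into a list, then pop them back out combining with a separately tracked power) by one loop that never materialises the digit list, maintaining only a running total and a power-of-ten multiplier.
import Mathlib
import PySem

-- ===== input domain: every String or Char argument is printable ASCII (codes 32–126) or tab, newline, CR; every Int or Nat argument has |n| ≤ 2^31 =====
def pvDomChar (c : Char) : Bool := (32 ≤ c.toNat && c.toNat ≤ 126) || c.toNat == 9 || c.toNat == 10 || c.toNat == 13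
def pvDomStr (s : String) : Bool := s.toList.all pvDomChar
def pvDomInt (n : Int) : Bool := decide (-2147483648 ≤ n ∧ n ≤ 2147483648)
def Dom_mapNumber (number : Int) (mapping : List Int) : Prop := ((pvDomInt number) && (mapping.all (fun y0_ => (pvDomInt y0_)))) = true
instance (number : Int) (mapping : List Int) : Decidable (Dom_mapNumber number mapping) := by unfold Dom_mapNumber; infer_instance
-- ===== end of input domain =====

-- B replaces A's two loops (digit list, then pop-and-recombine) by one accumulating loop
-- with a running multiplier; objective: simpler, same behaviour.

-- ===== PORT A =====
-- while number > 0: reversed_digits.append(number % 10); number = number // 10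
def pvDigitsLoopA (n : Int) (acc : List Int) : List Int :=
  if h : 0 < n then
    pvDigitsLoopA (PySem.Int.floordiv n 10) (acc ++ [PySem.Int.mod n 10])
  else acc
termination_by n.toNat
decreasing_by
  rw [PySem.Int.floordiv_eq_ediv_of_pos (by norm_num)]
  omega

-- while reversed_digits: result += mapping[reversed_digits.pop()] * 10 ** power; power -= 1
-- (10 ** power is ported as 10 ^ power.toNat; power ≥ 0 in every reachable state, exact there)
def pvSumLoopA (mapping : List Int) (ds : List Int) (result power : Int) : Int :=
  if h : ds = [] then result
  else
    pvSumLoopA mapping ds.dropLast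
      (result + PySem.List.pyGetD mapping (ds.getLast h) 0 * 10 ^ power.toNat) (power - 1)
termination_by ds.length
decreasing_by
  have : ds.length ≠ 0 := by simpa using h
  simp [List.length_dropLast]; omega

def mapNumber (number : Int) (mapping : List Int) : Int :=
  if number = 0 then PySem.List.pyGetD mapping 0 0
  else
    let reversed_digits := pvDigitsLoopA number []
    pvSumLoopA mapping reversed_digits 0 ((reversed_digits.length : Int) - 1)

-- ===== PORT B =====
-- while n > 0: result += mapping[n % 10] * multiplier; multiplier *= 10; n //= 10
def pvLoopAlt (mapping : List Int) (n result multiplier : Int) : Int :=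
  if h : 0 < n then
    pvLoopAlt mapping (PySem.Int.floordiv n 10)
      (result + PySem.List.pyGetD mapping (PySem.Int.mod n 10) 0 * multiplier)
      (multiplier * 10)
  else result
termination_by n.toNat
decreasing_by
  rw [PySem.Int.floordiv_eq_ediv_of_pos (by norm_num)]
  omega

def mapNumber_alt (number : Int) (mapping : List Int) : Int :=
  if number = 0 then PySem.List.pyGetD mapping 0 0
  else pvLoopAlt mapping number 0 1

-- ===== PRECONDITION & SPEC =====
-- Pre_ excludes exactly the inputs on which Python A raises IndexError: number = 0 with an
-- empty mapping, or number > 0 with some decimal digit ≥ len(mapping).  (Within Dom,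
-- number ≤ 2^31 < 10^10, so the first 10 digit positions cover all digits.)
def Pre_mapNumber (number : Int) (mapping : List Int) : Prop :=
  (number = 0 → mapping ≠ []) ∧
  (0 < number → ∀ k ∈ List.range 10,
    PySem.Int.mod (PySem.Int.floordiv number (10 ^ k)) 10 < (mapping.length : Int))
instance (number : Int) (mapping : List Int) : Decidable (Pre_mapNumber number mapping) := by
  unfold Pre_mapNumber; infer_instance

def pvWitness_mapNumber : Int × List Int := (25, [9, 8, 7, 6, 5, 4, 3, 2, 1, 0])

def Spec_mapNumber (number : Int) (mapping : List Int) (out : Int) : Prop := out = mapNumber_alt number mapping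
instance (number : Int) (mapping : List Int) (out : Int) : Decidable (Spec_mapNumber number mapping out) := by unfold Spec_mapNumber; infer_instance

-- ===== CLAIM (what is proved, stated in full; the proofs are below) =====
def Claim_equal_mapNumber : Prop := ∀ (number : Int) (mapping : List Int), Dom_mapNumber number mapping → Pre_mapNumber number mapping → Spec_mapNumber number mapping (mapNumber number mapping)

-- ===== LEMMAS AND PROOFS =====

/-- The digit stream of `n` (least significant first), a reference shape both loops reduce to. -/
def pvDigits (n : Int) : List Int :=
  if h : 0 < n then PySem.Int.mod n 10 :: pvDigits (PySem.Int.floordiv n 10) else []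
termination_by n.toNat
decreasing_by
  rw [PySem.Int.floordiv_eq_ediv_of_pos (by norm_num)]
  omega

/-- Weighted digit sum: Σ mapping[dᵢ]·10ⁱ over the digit list. -/
def pvWSum (mapping : List Int) : List Int → Int
  | [] => 0
  | d :: t => PySem.List.pyGetD mapping d 0 + 10 * pvWSum mapping t

theorem pvDigitsLoopA_eq (n : Int) (acc : List Int) :
    pvDigitsLoopA n acc = acc ++ pvDigits n := by
  induction n, acc using pvDigitsLoopA.induct with
  | case1 n acc h ih =>
    rw [pvDigitsLoopA, pvDigits, dif_pos h, dif_pos h, ih, List.append_assoc]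
    simp
  | case2 n acc h =>
    rw [pvDigitsLoopA, pvDigits, dif_neg h, dif_neg h, List.append_nil]

theorem pvWSum_append_singleton (m xs : List Int) (d : Int) :
    pvWSum m (xs ++ [d]) = pvWSum m xs + PySem.List.pyGetD m d 0 * 10 ^ xs.length := by
  induction xs with
  | nil => simp [pvWSum]
  | cons x t ih => simp [pvWSum, ih]; ring

theorem pvSumLoopA_eq (m : List Int) (ds : List Int) (r : Int) :
    pvSumLoopA m ds r ((ds.length : Int) - 1) = r + pvWSum m ds := by
  induction hn : ds.length using Nat.strong_induction_on generalizing ds r with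
  | _ L ih =>
    subst hn
    by_cases h : ds = []
    · subst h; rw [pvSumLoopA, dif_pos rfl]; simp [pvWSum]
    · rw [pvSumLoopA, dif_neg h]
      have hlen : ds.length ≠ 0 := by simpa using h
      have hd : ds.dropLast.length = ds.length - 1 := by simp
      have hpw : ((ds.length : Int) - 1 - 1) = ((ds.dropLast.length : Int) - 1) := by
        rw [hd]; omega
      have htn : ((ds.length : Int) - 1).toNat = ds.length - 1 := by omega
      rw [hpw, ih ds.dropLast.length (by rw [hd]; omega) _ _ rfl]
      have := List.dropLast_append_getLast h
      conv_rhs => rw [← this]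
      rw [pvWSum_append_singleton, htn, hd]
      ring

theorem pvLoopAlt_eq (m : List Int) (n r mult : Int) :
    pvLoopAlt m n r mult = r + mult * pvWSum m (pvDigits n) := by
  induction n, r, mult using pvLoopAlt.induct (mapping := m) with
  | case1 n r mult h ih =>
    rw [pvLoopAlt, pvDigits, dif_pos h, dif_pos h, ih]
    simp [pvWSum]; ring
  | case2 n r mult h =>
    rw [pvLoopAlt, pvDigits, dif_neg h, dif_neg h]
    simp [pvWSum]

-- ===== VERDICT (by name: the statement is the Claim_ definition above) =====
theorem mapNumber_spec : Claim_equal_mapNumber := by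
  intro number mapping _ _
  unfold Spec_mapNumber mapNumber mapNumber_alt
  by_cases h0 : number = 0
  · simp [h0]
  · rw [if_neg h0, if_neg h0]
    simp only [pvDigitsLoopA_eq, List.nil_append]
    rw [pvSumLoopA_eq, pvLoopAlt_eq]
    ring
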